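-- pv_equiv track=rewrite | github.com/thl13-uakron/Bioinformatics-sp2019 | project2/project2.py | nwFillGrid
-- ===== SOURCE A (Python) =====
-- gap = "-"
--
-- def nwFillGrid(s1, s2, scoringMatrix, alignmentGrid):
--     # to fill rest of grid:
--     # (1) fill square [k][k] starting with k=1
--     # (2) extend values in same column
--     # (3) extend values in same row
--     # (4) incremement k
--     # (5) repeat until k reaches length of shorter string m
--
--     if len(s1) < len(s2):
--         m = len(s1) + 1
--     else:
--         m = len(s2) + 1
--
--     for k in range (1, m):
--         nwFillSquare(s1, s2, scoringMatrix, alignmentGrid, k, k) # (1)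
--         for i in range (k, len(s1)):
--             nwFillSquare(s1, s2, scoringMatrix, alignmentGrid, i + 1, k) # (2)
--         for j in range (k, len(s2)):
--             nwFillSquare(s1, s2, scoringMatrix, alignmentGrid, k, j + 1) # (3)
--         # (4) (5)
--
--     return alignmentGrid
--
-- def nwFillSquare(s1, s2, scoringMatrix, alignmentGrid, x, y):
--     # to fill individual squares:
--     # (1) find highest score among available options:
--     #   (a) moving down from square [i][j - 1]
--     #   (b) moving right from square [i - 1][j]
--     #   (c) moving diagonally from square [i - 1][j - 1]
--
--     alignmentGrid[x][y] = alignmentGrid[x][y - 1] + scoringMatrix[gap][s2[y - 1]] # (1a)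
--
--     score = alignmentGrid[x - 1][y] + scoringMatrix[s1[x - 1]][gap] # (1b)
--     if score > alignmentGrid[x][y]:
--         alignmentGrid[x][y] = score
--
--     score = alignmentGrid[x - 1][y - 1] + scoringMatrix[s1[x - 1]][s2[y - 1]] # (1c)
--     if score > alignmentGrid[x][y]:
--         alignmentGrid[x][y] = score
--
--     return
-- ===== SOURCE B (Python) =====
-- gap = "-"
--
-- def nwFillGrid(s1, s2, scoringMatrix, alignmentGrid):
--     # Mutates alignmentGrid in place (like the original) and returns it.
--     # Single row-major double loop; each cell is max() of the three moves.
--     for x in range(1, len(s1) + 1):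
--         for y in range(1, len(s2) + 1):
--             alignmentGrid[x][y] = max(
--                 alignmentGrid[x][y - 1] + scoringMatrix[gap][s2[y - 1]],
--                 alignmentGrid[x - 1][y] + scoringMatrix[s1[x - 1]][gap],
--                 alignmentGrid[x - 1][y - 1] + scoringMatrix[s1[x - 1]][s2[y - 1]],
--             )
--     return alignmentGrid
-- ===== Notes on version B (the rewrite author's own statement) =====
-- stated objective: simpler
-- what changed: Replaced the L-shaped diagonal expansion (per-k: fill diagonal cell, then extend its column, then its row, via a mutating nwFillSquare helper with sequential conditional overwrites) by a single row-major double loop that sets each cell once to max() of the three moves; both mutate alignmentGrid in place and return it.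
import Mathlib
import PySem

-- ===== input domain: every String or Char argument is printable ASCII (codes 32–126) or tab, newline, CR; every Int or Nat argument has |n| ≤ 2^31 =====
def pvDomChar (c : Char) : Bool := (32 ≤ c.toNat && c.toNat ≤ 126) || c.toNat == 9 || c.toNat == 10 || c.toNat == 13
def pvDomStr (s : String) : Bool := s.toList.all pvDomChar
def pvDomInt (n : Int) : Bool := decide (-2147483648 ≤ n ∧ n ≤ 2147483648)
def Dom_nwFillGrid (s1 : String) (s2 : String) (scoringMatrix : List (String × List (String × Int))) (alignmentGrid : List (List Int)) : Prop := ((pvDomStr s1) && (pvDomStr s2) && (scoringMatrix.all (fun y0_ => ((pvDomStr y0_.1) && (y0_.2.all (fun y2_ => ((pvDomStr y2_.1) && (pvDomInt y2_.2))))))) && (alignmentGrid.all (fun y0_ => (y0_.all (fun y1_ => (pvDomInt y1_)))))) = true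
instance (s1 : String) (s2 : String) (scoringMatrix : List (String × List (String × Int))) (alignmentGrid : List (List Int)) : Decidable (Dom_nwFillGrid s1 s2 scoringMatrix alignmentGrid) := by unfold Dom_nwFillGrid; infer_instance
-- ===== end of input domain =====

-- B replaces A's L-shaped diagonal expansion by one row-major double loop with max();
-- like A, the Python B mutates alignmentGrid in place (the equivalence proved here is
-- about the returned grid, which for both programs is that same mutated list).

-- Shared primitives of both ports (Python list indexing / assignment / dict lookup on
-- in-range indices and present keys; Pre_ restricts to those, where these are exact).
def pvGetC (g : List (List Int)) (a b : Nat) : Int := (g.getD a []).getD b 0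
def pvSetC (g : List (List Int)) (x y : Nat) (v : Int) : List (List Int) :=
  g.set x ((g.getD x []).set y v)
-- s[i] for an in-range i: the one-character string Python returns
def pvChr (s : String) (i : Nat) : String := String.ofList [s.toList.getD i ' ']
-- scoringMatrix[a][b] for present keys (first-match association lookup)
def pvScore (sm : List (String × List (String × Int))) (a b : String) : Int :=
  ((((sm.lookup a).getD []).lookup b)).getD 0

-- ===== PORT A =====
def nwFillSquareA (s1 s2 : String) (sm : List (String × List (String × Int)))
    (g : List (List Int)) (x y : Nat) : List (List Int) :=
  -- alignmentGrid[x][y] = alignmentGrid[x][y-1] + scoringMatrix[gap][s2[y-1]]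
  let g1 := pvSetC g x y (pvGetC g x (y - 1) + pvScore sm "-" (pvChr s2 (y - 1)))
  -- score = alignmentGrid[x-1][y] + scoringMatrix[s1[x-1]][gap]; overwrite if greater
  let sc1 := pvGetC g1 (x - 1) y + pvScore sm (pvChr s1 (x - 1)) "-"
  let g2 := if sc1 > pvGetC g1 x y then pvSetC g1 x y sc1 else g1
  -- score = alignmentGrid[x-1][y-1] + scoringMatrix[s1[x-1]][s2[y-1]]; overwrite if greater
  let sc2 := pvGetC g2 (x - 1) (y - 1) + pvScore sm (pvChr s1 (x - 1)) (pvChr s2 (y - 1))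
  if sc2 > pvGetC g2 x y then pvSetC g2 x y sc2 else g2

def nwFillGrid (s1 : String) (s2 : String) (scoringMatrix : List (String × List (String × Int))) (alignmentGrid : List (List Int)) : List (List Int) :=
  let m := if s1.length < s2.length then s1.length + 1 else s2.length + 1
  (List.range' 1 (m - 1)).foldl (fun g k =>
    let g := nwFillSquareA s1 s2 scoringMatrix g k k
    let g := (List.range' k (s1.length - k)).foldl
      (fun g i => nwFillSquareA s1 s2 scoringMatrix g (i + 1) k) g
    (List.range' k (s2.length - k)).foldl
      (fun g j => nwFillSquareA s1 s2 scoringMatrix g k (j + 1)) g) alignmentGrid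

-- ===== PORT B =====
def nwFillGrid_alt (s1 : String) (s2 : String) (scoringMatrix : List (String × List (String × Int))) (alignmentGrid : List (List Int)) : List (List Int) :=
  (List.range' 1 s1.length).foldl (fun g x =>
    (List.range' 1 s2.length).foldl (fun g y =>
      pvSetC g x y
        (max (max (pvGetC g x (y - 1) + pvScore scoringMatrix "-" (pvChr s2 (y - 1)))
                  (pvGetC g (x - 1) y + pvScore scoringMatrix (pvChr s1 (x - 1)) "-"))
             (pvGetC g (x - 1) (y - 1) +
               pvScore scoringMatrix (pvChr s1 (x - 1)) (pvChr s2 (y - 1))))) g) alignmentGrid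

-- ===== PRECONDITION & SPEC =====
-- Pre_ excludes exactly the inputs on which the Python A raises: when the filled rectangle is
-- nonempty, A indexes alignmentGrid[x][y] for all x ≤ len(s1), y ≤ len(s2) (IndexError if the
-- grid is too small) and looks up scoringMatrix[c][d] for the gap and every character of
-- s1/s2 (KeyError if a key is missing).  When len(s1) = 0 or len(s2) = 0, A touches nothing.
def Pre_nwFillGrid (s1 : String) (s2 : String) (scoringMatrix : List (String × List (String × Int))) (alignmentGrid : List (List Int)) : Prop :=
  1 ≤ s1.length → 1 ≤ s2.length →
    (s1.length < alignmentGrid.length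
     ∧ ((List.range (s1.length + 1)).all
         (fun a => decide (s2.length < (alignmentGrid.getD a []).length))) = true
     ∧ (scoringMatrix.lookup "-").isSome = true
     ∧ (s2.toList.all (fun c =>
         (((scoringMatrix.lookup "-").getD []).lookup (String.ofList [c])).isSome)) = true
     ∧ (s1.toList.all (fun c =>
         (scoringMatrix.lookup (String.ofList [c])).isSome
         && (((scoringMatrix.lookup (String.ofList [c])).getD []).lookup "-").isSome
         && s2.toList.all (fun c2 =>
             (((scoringMatrix.lookup (String.ofList [c])).getD []).lookup
               (String.ofList [c2])).isSome))) = true)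
instance (s1 : String) (s2 : String) (scoringMatrix : List (String × List (String × Int))) (alignmentGrid : List (List Int)) : Decidable (Pre_nwFillGrid s1 s2 scoringMatrix alignmentGrid) := by unfold Pre_nwFillGrid; infer_instance

def pvWitness_nwFillGrid : String × String × (List (String × List (String × Int))) × List (List Int) :=
  ("A", "C", [("-", [("C", 1)]), ("A", [("-", -1), ("C", 2)])], [[0, -2], [-2, 0]])

def Spec_nwFillGrid (s1 : String) (s2 : String) (scoringMatrix : List (String × List (String × Int))) (alignmentGrid : List (List Int)) (out : List (List Int)) : Prop := out = nwFillGrid_alt s1 s2 scoringMatrix alignmentGrid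
instance (s1 : String) (s2 : String) (scoringMatrix : List (String × List (String × Int))) (alignmentGrid : List (List Int)) (out : List (List Int)) : Decidable (Spec_nwFillGrid s1 s2 scoringMatrix alignmentGrid out) := by unfold Spec_nwFillGrid; infer_instance

-- ===== CLAIM (what is proved, stated in full; the proofs are below) =====
def Claim_equal_nwFillGrid : Prop := ∀ (s1 : String) (s2 : String) (scoringMatrix : List (String × List (String × Int))) (alignmentGrid : List (List Int)), Dom_nwFillGrid s1 s2 scoringMatrix alignmentGrid → Pre_nwFillGrid s1 s2 scoringMatrix alignmentGrid → Spec_nwFillGrid s1 s2 scoringMatrix alignmentGrid (nwFillGrid s1 s2 scoringMatrix alignmentGrid)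

-- ===== LEMMAS AND PROOFS =====

-- The pure DP value of cell (a,b): border cells keep the input grid's value, interior
-- cells are the max of the three moves.
def pvDP (s1 s2 : String) (sm : List (String × List (String × Int)))
    (g0 : List (List Int)) : Nat → Nat → Int
  | a, b =>
    if a = 0 ∨ b = 0 then pvGetC g0 a b
    else
      max (max (pvDP s1 s2 sm g0 a (b - 1) + pvScore sm "-" (pvChr s2 (b - 1)))
               (pvDP s1 s2 sm g0 (a - 1) b + pvScore sm (pvChr s1 (a - 1)) "-"))
          (pvDP s1 s2 sm g0 (a - 1) (b - 1) + pvScore sm (pvChr s1 (a - 1)) (pvChr s2 (b - 1)))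
  termination_by a b => a + b
  decreasing_by all_goals omega

def pvMax3 (s1 s2 : String) (sm : List (String × List (String × Int)))
    (g : List (List Int)) (x y : Nat) : Int :=
  max (max (pvGetC g x (y - 1) + pvScore sm "-" (pvChr s2 (y - 1)))
           (pvGetC g (x - 1) y + pvScore sm (pvChr s1 (x - 1)) "-"))
      (pvGetC g (x - 1) (y - 1) + pvScore sm (pvChr s1 (x - 1)) (pvChr s2 (y - 1)))

-- shape bookkeeping
def pvShapeEq (g0 g : List (List Int)) : Prop :=
  g.length = g0.length ∧ ∀ a, (g.getD a []).length = (g0.getD a []).length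

-- invariant: cells satisfying S hold their DP value, all other cells are untouched
def pvInv (s1 s2 : String) (sm : List (String × List (String × Int)))
    (g0 : List (List Int)) (S : Nat → Nat → Prop) (g : List (List Int)) : Prop :=
  ∀ a b, (S a b → pvGetC g a b = pvDP s1 s2 sm g0 a b)
       ∧ (¬ S a b → pvGetC g a b = pvGetC g0 a b)

lemma pvSetC_length (g : List (List Int)) (x y : Nat) (v : Int) :
    (pvSetC g x y v).length = g.length := by
  simp [pvSetC]

lemma pvSetC_rowlen (g : List (List Int)) (x y : Nat) (v : Int) (a : Nat) :
    ((pvSetC g x y v).getD a []).length = (g.getD a []).length := by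
  unfold pvSetC
  simp only [List.getD_eq_getElem?_getD, List.getElem?_set]
  by_cases h : x = a
  · subst h
    by_cases hl : x < g.length
    · simp [hl]
    · rw [if_pos rfl, if_neg hl, List.getElem?_eq_none (by omega)]
  · simp [h]

lemma pvShapeEq_setC {g0 g : List (List Int)} (h : pvShapeEq g0 g) (x y : Nat) (v : Int) :
    pvShapeEq g0 (pvSetC g x y v) := by
  refine ⟨by rw [pvSetC_length]; exact h.1, fun a => by rw [pvSetC_rowlen]; exact h.2 a⟩

lemma pvGetC_setC {g : List (List Int)} {x y : Nat}
    (hx : x < g.length) (hy : y < (g.getD x []).length) (v : Int) (a b : Nat) :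
    pvGetC (pvSetC g x y v) a b = if a = x ∧ b = y then v else pvGetC g a b := by
  unfold pvGetC pvSetC
  simp only [List.getD_eq_getElem?_getD, List.getElem?_set]
  by_cases ha : a = x
  · subst ha
    simp only [List.getD_eq_getElem?_getD] at hy
    rw [if_pos rfl, if_pos hx, Option.getD_some]
    by_cases hb : b = y
    · subst hb
      simp [hy]
    · simp [Ne.symm hb, hb]
  · simp [Ne.symm ha, ha]

lemma pvSetC_setC {g : List (List Int)} {x y : Nat} (hx : x < g.length) (v w : Int) :
    pvSetC (pvSetC g x y v) x y w = pvSetC g x y w := by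
  unfold pvSetC
  simp only [List.getD_eq_getElem?_getD, List.getElem?_set]
  simp [hx, List.set_set]

-- A's nwFillSquare equals one single write of the max of the three options
lemma fillSq_eq (s1 s2 : String) (sm : List (String × List (String × Int)))
    {g : List (List Int)} {x y : Nat} (hx1 : 1 ≤ x) (hy1 : 1 ≤ y)
    (hx : x < g.length) (hy : y < (g.getD x []).length) :
    nwFillSquareA s1 s2 sm g x y = pvSetC g x y (pvMax3 s1 s2 sm g x y) := by
  have hu : ¬ (x - 1 = x) := by omega
  have hv : ¬ (y - 1 = y) := by omega
  unfold nwFillSquareA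
  simp only [pvGetC_setC hx hy, pvSetC_setC hx, hu, and_true, and_self, if_true, if_false,
    gt_iff_lt]
  split_ifs with h1 h2 h3 <;>
  · simp only [pvGetC_setC hx hy, pvSetC_setC hx, hu, hv, and_self, if_true, if_false] at *
    congr 1
    unfold pvMax3
    simp only [max_def]
    split_ifs <;> omega

-- the DP recurrence at an interior cell
lemma pvDP_rect (s1 s2 : String) (sm : List (String × List (String × Int)))
    (g0 : List (List Int)) {a b : Nat} (ha : 1 ≤ a) (hb : 1 ≤ b) :
    pvDP s1 s2 sm g0 a b =
      max (max (pvDP s1 s2 sm g0 a (b - 1) + pvScore sm "-" (pvChr s2 (b - 1)))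
               (pvDP s1 s2 sm g0 (a - 1) b + pvScore sm (pvChr s1 (a - 1)) "-"))
          (pvDP s1 s2 sm g0 (a - 1) (b - 1) + pvScore sm (pvChr s1 (a - 1)) (pvChr s2 (b - 1))) := by
  rw [pvDP]
  rw [if_neg (by omega)]

lemma pvDP_border (s1 s2 : String) (sm : List (String × List (String × Int)))
    (g0 : List (List Int)) {a b : Nat} (h : a = 0 ∨ b = 0) :
    pvDP s1 s2 sm g0 a b = pvGetC g0 a b := by
  rw [pvDP]
  rw [if_pos h]

lemma pvInv_congr {s1 s2 : String} {sm : List (String × List (String × Int))}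
    {g0 g : List (List Int)} {S T : Nat → Nat → Prop}
    (h : ∀ a b, S a b ↔ T a b) (hI : pvInv s1 s2 sm g0 S g) : pvInv s1 s2 sm g0 T g := by
  intro a b
  exact ⟨fun hT => (hI a b).1 ((h a b).mpr hT), fun hT => (hI a b).2 (fun hS => hT ((h a b).mp hS))⟩

-- one cell step: if the three neighbours are already correct, writing max3 extends the invariant
lemma pvInv_step (s1 s2 : String) (sm : List (String × List (String × Int)))
    (g0 : List (List Int)) {S T : Nat → Nat → Prop} {g : List (List Int)} {x y : Nat}
    (hg0 : s1.length < g0.length ∧ ∀ a, a ≤ s1.length → s2.length < (g0.getD a []).length)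
    (hsh : pvShapeEq g0 g)
    (hx1 : 1 ≤ x) (hxn : x ≤ s1.length) (hy1 : 1 ≤ y) (hym : y ≤ s2.length)
    (hSrect : ∀ a b, S a b → 1 ≤ a ∧ a ≤ s1.length ∧ 1 ≤ b ∧ b ≤ s2.length)
    (hI : pvInv s1 s2 sm g0 S g)
    (hl : S x (y - 1) ∨ y - 1 = 0)
    (hu : S (x - 1) y ∨ x - 1 = 0)
    (hd : S (x - 1) (y - 1) ∨ x - 1 = 0 ∨ y - 1 = 0)
    (hT : ∀ a b, T a b ↔ S a b ∨ (a = x ∧ b = y)) :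
    pvInv s1 s2 sm g0 T (pvSetC g x y (pvMax3 s1 s2 sm g x y)) := by
  have hlen : x < g.length := by have := hg0.1; rw [hsh.1]; omega
  have hrow : y < (g.getD x []).length := by
    have := hg0.2 x hxn; rw [hsh.2 x]; omega
  have hvl : pvGetC g x (y - 1) = pvDP s1 s2 sm g0 x (y - 1) := by
    rcases hl with h | h
    · exact (hI _ _).1 h
    · have hnS : ¬ S x (y - 1) := fun hS => by have := hSrect _ _ hS; omega
      rw [(hI _ _).2 hnS, pvDP_border _ _ _ _ (Or.inr h)]
  have hvu : pvGetC g (x - 1) y = pvDP s1 s2 sm g0 (x - 1) y := by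
    rcases hu with h | h
    · exact (hI _ _).1 h
    · have hnS : ¬ S (x - 1) y := fun hS => by have := hSrect _ _ hS; omega
      rw [(hI _ _).2 hnS, pvDP_border _ _ _ _ (Or.inl h)]
  have hvd : pvGetC g (x - 1) (y - 1) = pvDP s1 s2 sm g0 (x - 1) (y - 1) := by
    rcases hd with h | h
    · exact (hI _ _).1 h
    · have hnS : ¬ S (x - 1) (y - 1) := fun hS => by have := hSrect _ _ hS; omega
      rw [(hI _ _).2 hnS, pvDP_border _ _ _ _ h]
  have hmax : pvMax3 s1 s2 sm g x y = pvDP s1 s2 sm g0 x y := by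
    rw [pvDP_rect _ _ _ _ hx1 hy1]
    unfold pvMax3
    rw [hvl, hvu, hvd]
  intro a b
  rw [pvGetC_setC hlen hrow]
  constructor
  · intro hTa
    by_cases hab : a = x ∧ b = y
    · rw [if_pos hab, hmax, hab.1, hab.2]
    · rw [if_neg hab]
      exact (hI a b).1 ((or_iff_left hab).mp ((hT a b).mp hTa))
  · intro hTn
    have hnS : ¬ S a b := fun h => hTn ((hT a b).mpr (Or.inl h))
    have hab : ¬(a = x ∧ b = y) := fun h => hTn ((hT a b).mpr (Or.inr h))
    rw [if_neg hab]
    exact (hI a b).2 hnS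

-- grids with equal shape and equal entries are equal
lemma pvGrids_eq {g1 g2 : List (List Int)} (hlen : g1.length = g2.length)
    (hrow : ∀ a, (g1.getD a []).length = (g2.getD a []).length)
    (hval : ∀ a b, pvGetC g1 a b = pvGetC g2 a b) : g1 = g2 := by
  apply List.ext_getElem hlen
  intro i h1 h2
  apply List.ext_getElem
  · have := hrow i
    rwa [List.getD_eq_getElem _ _ h1, List.getD_eq_getElem _ _ h2] at this
  · intro j hj1 hj2
    have := hval i j
    unfold pvGetC at this
    rwa [List.getD_eq_getElem _ _ h1, List.getD_eq_getElem _ _ h2,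
         List.getD_eq_getElem _ _ hj1, List.getD_eq_getElem _ _ hj2] at this

-- region predicates for the two traversals
def pvRect (n m a b : Nat) : Prop := 1 ≤ a ∧ a ≤ n ∧ 1 ≤ b ∧ b ≤ m
def pvSB (n m x y0 a b : Nat) : Prop := pvRect n m a b ∧ (a < x ∨ (a = x ∧ b ≤ y0))
def pvSA (n m k a b : Nat) : Prop := pvRect n m a b ∧ min a b ≤ k
def pvSCol (n m k x0 a b : Nat) : Prop :=
  pvRect n m a b ∧ (min a b ≤ k - 1 ∨ (b = k ∧ a ≤ x0))
def pvSRow (n m k y0 a b : Nat) : Prop :=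
  pvRect n m a b ∧ (min a b ≤ k - 1 ∨ (b = k ∧ k ≤ a) ∨ (a = k ∧ b ≤ y0))

lemma pvFoldl_id (l : List Nat) (g : List (List Int)) :
    l.foldl (fun g _ => g) g = g := by
  induction l generalizing g with
  | nil => rfl
  | cons h t ih => exact ih g

-- B's inner loop fills row x left to right
lemma bInner (s1 s2 : String) (sm : List (String × List (String × Int)))
    (g0 : List (List Int))
    (hg0 : s1.length < g0.length ∧ ∀ a, a ≤ s1.length → s2.length < (g0.getD a []).length)
    (x : Nat) (hx1 : 1 ≤ x) (hxn : x ≤ s1.length) :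
    ∀ (cnt s_ : Nat) (g : List (List Int)), 1 ≤ s_ → s_ + cnt = s2.length + 1 →
      pvShapeEq g0 g → pvInv s1 s2 sm g0 (pvSB s1.length s2.length x (s_ - 1)) g →
      pvShapeEq g0
        ((List.range' s_ cnt).foldl (fun g y => pvSetC g x y (pvMax3 s1 s2 sm g x y)) g)
      ∧ pvInv s1 s2 sm g0 (pvSB s1.length s2.length x s2.length)
        ((List.range' s_ cnt).foldl (fun g y => pvSetC g x y (pvMax3 s1 s2 sm g x y)) g) := by
  intro cnt
  induction cnt with
  | zero =>
    intro s_ g hs1 hcnt hsh hI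
    refine ⟨hsh, pvInv_congr (fun a b => by unfold pvSB pvRect; omega) hI⟩
  | succ cnt ih =>
    intro s_ g hs1 hcnt hsh hI
    rw [List.range'_succ, List.foldl_cons]
    have hstep := pvInv_step s1 s2 sm g0 hg0 hsh (x := x) (y := s_)
      (T := pvSB s1.length s2.length x s_) hx1 hxn hs1 (by omega)
      (fun a b h => by unfold pvSB pvRect at h; omega) hI
      (by unfold pvSB pvRect; omega) (by unfold pvSB pvRect; omega)
      (by unfold pvSB pvRect; omega)
      (fun a b => by unfold pvSB pvRect; omega)
    exact ih (s_ + 1) _ (by omega) (by omega) (pvShapeEq_setC hsh x s_ _)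
      (pvInv_congr (fun a b => by unfold pvSB pvRect; omega) hstep)

-- B's outer loop fills rows top to bottom
lemma bOuter (s1 s2 : String) (sm : List (String × List (String × Int)))
    (g0 : List (List Int))
    (hg0 : s1.length < g0.length ∧ ∀ a, a ≤ s1.length → s2.length < (g0.getD a []).length) :
    ∀ (cnt s_ : Nat) (g : List (List Int)), 1 ≤ s_ → s_ + cnt = s1.length + 1 →
      pvShapeEq g0 g → pvInv s1 s2 sm g0 (pvSB s1.length s2.length (s_ - 1) s2.length) g →
      pvShapeEq g0
        ((List.range' s_ cnt).foldl (fun g x =>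
          (List.range' 1 s2.length).foldl
            (fun g y => pvSetC g x y (pvMax3 s1 s2 sm g x y)) g) g)
      ∧ pvInv s1 s2 sm g0 (pvSB s1.length s2.length s1.length s2.length)
        ((List.range' s_ cnt).foldl (fun g x =>
          (List.range' 1 s2.length).foldl
            (fun g y => pvSetC g x y (pvMax3 s1 s2 sm g x y)) g) g) := by
  intro cnt
  induction cnt with
  | zero =>
    intro s_ g hs1 hcnt hsh hI
    refine ⟨hsh, pvInv_congr (fun a b => by unfold pvSB pvRect; omega) hI⟩
  | succ cnt ih =>
    intro s_ g hs1 hcnt hsh hI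
    rw [List.range'_succ, List.foldl_cons]
    have hrow := bInner s1 s2 sm g0 hg0 s_ hs1 (by omega) s2.length 1 g (by omega)
      (by omega) hsh (pvInv_congr (fun a b => by unfold pvSB pvRect; omega) hI)
    exact ih (s_ + 1) _ (by omega) (by omega) hrow.1
      (pvInv_congr (fun a b => by unfold pvSB pvRect; omega) hrow.2)

-- A's column extension at stage k
lemma aCol (s1 s2 : String) (sm : List (String × List (String × Int)))
    (g0 : List (List Int))
    (hg0 : s1.length < g0.length ∧ ∀ a, a ≤ s1.length → s2.length < (g0.getD a []).length)
    (k : Nat) (hk1 : 1 ≤ k) (_hkn : k ≤ s1.length) (hkm : k ≤ s2.length) :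
    ∀ (cnt s_ : Nat) (g : List (List Int)), k ≤ s_ → s_ + cnt = s1.length →
      pvShapeEq g0 g → pvInv s1 s2 sm g0 (pvSCol s1.length s2.length k s_) g →
      pvShapeEq g0
        ((List.range' s_ cnt).foldl (fun g i => nwFillSquareA s1 s2 sm g (i + 1) k) g)
      ∧ pvInv s1 s2 sm g0 (pvSCol s1.length s2.length k s1.length)
        ((List.range' s_ cnt).foldl (fun g i => nwFillSquareA s1 s2 sm g (i + 1) k) g) := by
  intro cnt
  induction cnt with
  | zero =>
    intro s_ g hs hcnt hsh hI
    refine ⟨hsh, pvInv_congr (fun a b => by unfold pvSCol pvRect; omega) hI⟩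
  | succ cnt ih =>
    intro s_ g hs hcnt hsh hI
    rw [List.range'_succ, List.foldl_cons]
    have hxb : s_ + 1 < g.length := by have := hg0.1; rw [hsh.1]; omega
    have hyb : k < (g.getD (s_ + 1) []).length := by
      have := hg0.2 (s_ + 1) (by omega); rw [hsh.2]; omega
    rw [fillSq_eq s1 s2 sm (by omega) hk1 hxb hyb]
    have hstep := pvInv_step s1 s2 sm g0 hg0 hsh (x := s_ + 1) (y := k)
      (T := pvSCol s1.length s2.length k (s_ + 1)) (by omega)
      (by omega) hk1 hkm
      (fun a b h => by unfold pvSCol pvRect at h; omega) hI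
      (by unfold pvSCol pvRect; omega) (by unfold pvSCol pvRect; omega)
      (by unfold pvSCol pvRect; omega)
      (fun a b => by unfold pvSCol pvRect; omega)
    exact ih (s_ + 1) _ (by omega) (by omega) (pvShapeEq_setC hsh _ _ _)
      (pvInv_congr (fun a b => Iff.rfl) hstep)

-- A's row extension at stage k
lemma aRow (s1 s2 : String) (sm : List (String × List (String × Int)))
    (g0 : List (List Int))
    (hg0 : s1.length < g0.length ∧ ∀ a, a ≤ s1.length → s2.length < (g0.getD a []).length)
    (k : Nat) (hk1 : 1 ≤ k) (hkn : k ≤ s1.length) (hkm : k ≤ s2.length) :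
    ∀ (cnt s_ : Nat) (g : List (List Int)), k ≤ s_ → s_ + cnt = s2.length →
      pvShapeEq g0 g → pvInv s1 s2 sm g0 (pvSRow s1.length s2.length k s_) g →
      pvShapeEq g0
        ((List.range' s_ cnt).foldl (fun g j => nwFillSquareA s1 s2 sm g k (j + 1)) g)
      ∧ pvInv s1 s2 sm g0 (pvSRow s1.length s2.length k s2.length)
        ((List.range' s_ cnt).foldl (fun g j => nwFillSquareA s1 s2 sm g k (j + 1)) g) := by
  intro cnt
  induction cnt with
  | zero =>
    intro s_ g hs hcnt hsh hI
    refine ⟨hsh, pvInv_congr (fun a b => by unfold pvSRow pvRect; omega) hI⟩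
  | succ cnt ih =>
    intro s_ g hs hcnt hsh hI
    rw [List.range'_succ, List.foldl_cons]
    have hxb : k < g.length := by have := hg0.1; rw [hsh.1]; omega
    have hyb : s_ + 1 < (g.getD k []).length := by
      have := hg0.2 k (by omega); rw [hsh.2]; omega
    rw [fillSq_eq s1 s2 sm hk1 (by omega) hxb hyb]
    have hstep := pvInv_step s1 s2 sm g0 hg0 hsh (x := k) (y := s_ + 1)
      (T := pvSRow s1.length s2.length k (s_ + 1)) hk1 hkn
      (by omega) (by omega)
      (fun a b h => by unfold pvSRow pvRect at h; omega) hI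
      (by unfold pvSRow pvRect; omega) (by unfold pvSRow pvRect; omega)
      (by unfold pvSRow pvRect; omega)
      (fun a b => by unfold pvSRow pvRect; omega)
    exact ih (s_ + 1) _ (by omega) (by omega) (pvShapeEq_setC hsh _ _ _)
      (pvInv_congr (fun a b => Iff.rfl) hstep)

-- A's outer loop over the diagonal index k
lemma aOuter (s1 s2 : String) (sm : List (String × List (String × Int)))
    (g0 : List (List Int))
    (hg0 : s1.length < g0.length ∧ ∀ a, a ≤ s1.length → s2.length < (g0.getD a []).length) :
    ∀ (cnt s_ : Nat) (g : List (List Int)), 1 ≤ s_ →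
      s_ + cnt = min s1.length s2.length + 1 →
      pvShapeEq g0 g → pvInv s1 s2 sm g0 (pvSA s1.length s2.length (s_ - 1)) g →
      pvShapeEq g0
        ((List.range' s_ cnt).foldl (fun g k =>
          (List.range' k (s2.length - k)).foldl
            (fun g j => nwFillSquareA s1 s2 sm g k (j + 1))
            ((List.range' k (s1.length - k)).foldl
              (fun g i => nwFillSquareA s1 s2 sm g (i + 1) k)
              (nwFillSquareA s1 s2 sm g k k))) g)
      ∧ pvInv s1 s2 sm g0 (pvSA s1.length s2.length (min s1.length s2.length))
        ((List.range' s_ cnt).foldl (fun g k =>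
          (List.range' k (s2.length - k)).foldl
            (fun g j => nwFillSquareA s1 s2 sm g k (j + 1))
            ((List.range' k (s1.length - k)).foldl
              (fun g i => nwFillSquareA s1 s2 sm g (i + 1) k)
              (nwFillSquareA s1 s2 sm g k k))) g) := by
  intro cnt
  induction cnt with
  | zero =>
    intro s_ g hs hcnt hsh hI
    refine ⟨hsh, pvInv_congr (fun a b => by unfold pvSA pvRect; omega) hI⟩
  | succ cnt ih =>
    intro s_ g hs hcnt hsh hI
    rw [List.range'_succ, List.foldl_cons]
    have hkn : s_ ≤ s1.length := by omega
    have hkm : s_ ≤ s2.length := by omega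
    have hxb : s_ < g.length := by have := hg0.1; rw [hsh.1]; omega
    have hyb : s_ < (g.getD s_ []).length := by
      have := hg0.2 s_ (by omega); rw [hsh.2]; omega
    rw [fillSq_eq s1 s2 sm hs hs hxb hyb]
    have hdiag := pvInv_step s1 s2 sm g0 hg0 hsh (x := s_) (y := s_) hs hkn hs hkm
      (fun a b h => by unfold pvSA pvRect at h; omega) hI
      (by unfold pvSA pvRect; omega) (by unfold pvSA pvRect; omega)
      (by unfold pvSA pvRect; omega)
      (fun a b => by unfold pvSCol pvSA pvRect; omega)
        (T := pvSCol s1.length s2.length s_ s_)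
    have hcol := aCol s1 s2 sm g0 hg0 s_ hs hkn hkm (s1.length - s_) s_ _
      (by omega) (by omega) (pvShapeEq_setC hsh _ _ _) hdiag
    have hrow := aRow s1 s2 sm g0 hg0 s_ hs hkn hkm (s2.length - s_) s_ _
      (by omega) (by omega) hcol.1
      (pvInv_congr (fun a b => by unfold pvSCol pvSRow pvRect; omega) hcol.2)
    exact ih (s_ + 1) _ (by omega) (by omega) hrow.1
      (pvInv_congr (fun a b => by unfold pvSRow pvSA pvRect; omega) hrow.2)

-- ===== VERDICT (by name: the statement is the Claim_ definition above) =====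
theorem nwFillGrid_spec : Claim_equal_nwFillGrid := by
  intro s1 s2 sm g _hdom hpre
  unfold Spec_nwFillGrid
  by_cases hnm : 1 ≤ s1.length ∧ 1 ≤ s2.length
  · obtain ⟨hlen, hrows, _⟩ := hpre hnm.1 hnm.2
    have hg0 : s1.length < g.length ∧
        ∀ a, a ≤ s1.length → s2.length < (g.getD a []).length :=
      ⟨hlen, fun a ha => of_decide_eq_true
        (List.all_eq_true.mp hrows a (List.mem_range.mpr (by omega)))⟩
    have hsh0 : pvShapeEq g g := ⟨rfl, fun _ => rfl⟩
    have hI0A : pvInv s1 s2 sm g (pvSA s1.length s2.length 0) g := by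
      intro a b
      exact ⟨fun h => by exfalso; unfold pvSA pvRect at h; omega, fun _ => rfl⟩
    have hI0B : pvInv s1 s2 sm g (pvSB s1.length s2.length 0 s2.length) g := by
      intro a b
      exact ⟨fun h => by exfalso; unfold pvSB pvRect at h; omega, fun _ => rfl⟩
    have hmin : (if s1.length < s2.length then s1.length + 1 else s2.length + 1) - 1 =
        min s1.length s2.length := by split_ifs <;> omega
    have hA := aOuter s1 s2 sm g hg0 (min s1.length s2.length) 1 g (by omega) (by omega)
      hsh0 hI0A
    have hB := bOuter s1 s2 sm g hg0 s1.length 1 g (by omega) (by omega) hsh0 hI0B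
    have heqA : nwFillGrid s1 s2 sm g =
        (List.range' 1 (min s1.length s2.length)).foldl (fun g k =>
          (List.range' k (s2.length - k)).foldl
            (fun g j => nwFillSquareA s1 s2 sm g k (j + 1))
            ((List.range' k (s1.length - k)).foldl
              (fun g i => nwFillSquareA s1 s2 sm g (i + 1) k)
              (nwFillSquareA s1 s2 sm g k k))) g := by
      unfold nwFillGrid
      dsimp only
      rw [hmin]
    have heqB : nwFillGrid_alt s1 s2 sm g =
        (List.range' 1 s1.length).foldl (fun g x =>
          (List.range' 1 s2.length).foldl
            (fun g y => pvSetC g x y (pvMax3 s1 s2 sm g x y)) g) g := rfl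
    rw [heqA, heqB]
    apply pvGrids_eq (by rw [hA.1.1, hB.1.1]) (fun a => by rw [hA.1.2, hB.1.2])
    intro a b
    by_cases hr : pvRect s1.length s2.length a b
    · rw [(hA.2 a b).1 ⟨hr, by unfold pvRect at hr; omega⟩,
          (hB.2 a b).1 ⟨hr, by unfold pvRect at hr; omega⟩]
    · rw [(hA.2 a b).2 (fun h => hr h.1), (hB.2 a b).2 (fun h => hr h.1)]
  · have h0 : s1.length = 0 ∨ s2.length = 0 := by omega
    have hA : nwFillGrid s1 s2 sm g = g := by
      unfold nwFillGrid
      dsimp only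
      have : (if s1.length < s2.length then s1.length + 1 else s2.length + 1) - 1 = 0 := by
        split_ifs <;> omega
      rw [this, List.range'_zero, List.foldl_nil]
    have hB : nwFillGrid_alt s1 s2 sm g = g := by
      unfold nwFillGrid_alt
      rcases h0 with h | h
      · rw [h, List.range'_zero, List.foldl_nil]
      · rw [h, List.range'_zero]
        simp only [List.foldl_nil]
        exact pvFoldl_id _ g
    rw [hA, hB]
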